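-- pv_equiv track=rewrite | github.com/vagarwala/CodeWars-Solutions | pattern16.py | pattern16
-- ===== SOURCE A (Python) =====
-- def pattern16(n):
--     if n <= 0:
--         return ''
--     else:
--         nums = [i % 10 for i in range(1, n+1)][::-1]
--         lines = ''
--         for i in range(n):
--             for j in range(i):
--                 lines += str(nums[j])
--             lines += (n-i)*str(nums[i])
--             lines += '\n'
--         return lines[:-1]
-- ===== SOURCE B (Python) =====
-- def pattern16(n):
--     if n <= 0:
--         return ''
--     diag = ''.join(str(d % 10) for d in range(n, 0, -1))
--     return '\n'.join(diag[:i].ljust(n, diag[i]) for i in range(n))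
-- ===== Notes on version B (the rewrite author's own statement) =====
-- stated objective: faster
-- what changed: Replaces the reversed digit list, the per-character inner loop, the string repeat-multiply and the trailing-newline trim by building the diagonal digit string once and emitting each row as a prefix of it left-justified with the diagonal character, joined by newline.
import Mathlib
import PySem

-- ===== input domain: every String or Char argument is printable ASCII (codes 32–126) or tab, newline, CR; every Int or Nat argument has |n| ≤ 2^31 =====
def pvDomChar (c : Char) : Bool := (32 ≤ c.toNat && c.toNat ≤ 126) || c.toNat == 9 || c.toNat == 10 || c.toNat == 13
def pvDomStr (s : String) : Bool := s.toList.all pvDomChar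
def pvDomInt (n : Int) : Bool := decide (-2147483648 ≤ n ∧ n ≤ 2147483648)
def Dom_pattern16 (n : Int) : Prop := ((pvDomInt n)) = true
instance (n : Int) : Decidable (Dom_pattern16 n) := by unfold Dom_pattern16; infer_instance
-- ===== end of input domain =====

-- B replaces A's reversed digit list, per-character inner loop, repeat-multiply and
-- trailing-newline trim by one diagonal string built once, whose prefixes are
-- left-justified (padded with the diagonal character) and joined with '\n'.

-- ===== PORT A =====
-- The Python string `lines` is carried as its List Char; [::-1] is slice? with step -1
-- (never none since step ≠ 0 — .getD [] is unreachable); nums[j] is pyGetD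
-- (the indices j < i < n are always in range, so the default is unreachable too).
def pattern16 (n : Int) : String :=
  if n ≤ 0 then ""
  else
    let nums : List Int :=
      (PySem.List.slice? ((PySem.List.pyRange 1 (n + 1) 1).map (fun i => PySem.Int.mod i 10))
        none none (-1)).getD []
    let lines : List Char :=
      (PySem.List.pyRange 0 n 1).foldl (fun lines i =>
        let lines := (PySem.List.pyRange 0 i 1).foldl (fun lines j =>
          lines ++ PySem.Int.toChars (PySem.List.pyGetD nums j 0)) lines
        let lines := lines ++ PySem.List.pyRepeat (PySem.Int.toChars (PySem.List.pyGetD nums i 0)) (n - i)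
        lines ++ ['\n']) []
    String.ofList (PySem.List.slice lines none (some (-1)))

-- ===== PORT B =====
-- s.ljust(w, fill) for a one-character fill, ported by hand (exact: Python pads on the
-- right up to width w, returns s unchanged if len(s) ≥ w or w < 0 — .toNat then gives 0).
def ljustChars (s : List Char) (w : Int) (fill : Char) : List Char :=
  s ++ List.replicate (w.toNat - s.length) fill

-- diag[i] is pyGetD (i < n is always in range, the default ' ' is unreachable);
-- strings are carried as List Char; ''.join / '\n'.join are PySem.Chars.join.
def pattern16_alt (n : Int) : String :=
  if n ≤ 0 then ""
  else
    let diag : List Char :=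
      PySem.Chars.join [] ((PySem.List.pyRange n 0 (-1)).map (fun d => PySem.Int.toChars (PySem.Int.mod d 10)))
    String.ofList (PySem.Chars.join ['\n']
      ((PySem.List.pyRange 0 n 1).map (fun i =>
        ljustChars (PySem.List.slice diag none (some i)) n (PySem.List.pyGetD diag i ' '))))

-- ===== PRECONDITION & SPEC =====
def Spec_pattern16 (n : Int) (out : String) : Prop := out = pattern16_alt n
instance (n : Int) (out : String) : Decidable (Spec_pattern16 n out) := by unfold Spec_pattern16; infer_instance

-- ===== CLAIM (what is proved, stated in full; the proofs are below) =====
def Claim_equal_pattern16 : Prop := ∀ (n : Int), Dom_pattern16 n → Spec_pattern16 n (pattern16 n)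

-- ===== LEMMAS AND PROOFS =====

-- join with empty separator is flatten
theorem p16_join_nil_sep (parts : List (List Char)) :
    PySem.Chars.join [] parts = parts.flatten := by
  induction parts with
  | nil => simp [PySem.Chars.join_nil]
  | cons p rest ih =>
    cases rest with
    | nil => simp [PySem.Chars.join_singleton]
    | cons q rest' =>
      rw [PySem.Chars.join_cons_cons]
      simp [ih]

-- x % 10 lands in [0, 10)
theorem p16_mod_bounds (x : Int) : 0 ≤ PySem.Int.mod x 10 ∧ PySem.Int.mod x 10 < 10 := by
  unfold PySem.Int.mod
  exact ⟨Int.fmod_nonneg_of_pos x (by norm_num), Int.fmod_lt_of_pos x (by norm_num)⟩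

-- str(m) of a single digit is one character
theorem p16_toChars_digit (m : Int) (h0 : 0 ≤ m) (h1 : m < 10) :
    PySem.Int.toChars m = [(PySem.Int.toChars m).headI] := by
  interval_cases m <;> decide

-- flatten of singleton blocks is a map
theorem p16_flatMap_singleton {α β : Type} (l : List α) (f : α → β) :
    l.flatMap (fun k => [f k]) = l.map f := by
  induction l with
  | nil => rfl
  | cons a t ih => simp [ih]

-- A's reversed digit list, looked up at j (0 ≤ j < n), is (n - j) % 10
theorem p16_nums_get (n j : Int) (h0 : 0 ≤ j) (h1 : j < n) :
    PySem.List.pyGetD (((PySem.List.pyRange 1 (n + 1) 1).map (fun i => PySem.Int.mod i 10)).reverse) j 0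
      = PySem.Int.mod (n - j) 10 := by
  have hlen : (((PySem.List.pyRange 1 (n + 1) 1).map (fun i => PySem.Int.mod i 10)).reverse).length
      = n.toNat := by
    simp [PySem.List.length_pyRange_one]
  have hj : j < ((((PySem.List.pyRange 1 (n + 1) 1).map (fun i => PySem.Int.mod i 10)).reverse).length : Int) := by
    rw [hlen]; omega
  rw [PySem.List.pyGetD_eq_getElem _ 0 h0 hj]
  rw [List.getElem_reverse, List.getElem_map, PySem.List.getElem_pyRange_one]
  congr 1
  have hlm : ((PySem.List.pyRange 1 (n + 1) 1).map (fun i => PySem.Int.mod i 10)).length = n.toNat := by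
    simp [PySem.List.length_pyRange_one]
  rw [hlm]
  omega

-- A's outer loop, as a flatMap of per-row pieces
theorem p16_loopA (n : Int) (nums : List Int) (l : List Int) (acc : List Char) :
    l.foldl (fun lines i =>
        let lines := (PySem.List.pyRange 0 i 1).foldl (fun lines j =>
          lines ++ PySem.Int.toChars (PySem.List.pyGetD nums j 0)) lines
        let lines := lines ++ PySem.List.pyRepeat (PySem.Int.toChars (PySem.List.pyGetD nums i 0)) (n - i)
        lines ++ ['\n']) acc
      = acc ++ l.flatMap (fun i =>
          ((PySem.List.pyRange 0 i 1).flatMap (fun j => PySem.Int.toChars (PySem.List.pyGetD nums j 0))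
            ++ PySem.List.pyRepeat (PySem.Int.toChars (PySem.List.pyGetD nums i 0)) (n - i)) ++ ['\n']) := by
  induction l generalizing acc with
  | nil => simp
  | cons a t ih =>
    simp only [List.foldl_cons, List.flatMap_cons]
    rw [ih, PySem.List.foldl_append_eq_flatMap]
    simp [List.append_assoc]

-- B's diagonal string is the list of digit characters c k = str((n-k) % 10)
theorem p16_diag (n : Int) :
    PySem.Chars.join [] ((PySem.List.pyRange n 0 (-1)).map (fun d => PySem.Int.toChars (PySem.Int.mod d 10)))
      = (List.range n.toNat).map (fun (k : ℕ) => (PySem.Int.toChars (PySem.Int.mod (n - (k : Int)) 10)).headI) := by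
  rw [p16_join_nil_sep, PySem.List.pyRange_neg_one, List.map_map]
  simp only [Int.sub_zero]
  have h1 : ((fun d => PySem.Int.toChars (PySem.Int.mod d 10)) ∘ fun (k : ℕ) => n - (k : Int))
      = fun (k : ℕ) => PySem.Int.toChars (PySem.Int.mod (n - (k : Int)) 10) := rfl
  rw [h1]
  have h2 : (List.range n.toNat).map (fun (k : ℕ) => PySem.Int.toChars (PySem.Int.mod (n - (k : Int)) 10))
      = (List.range n.toNat).map (fun (k : ℕ) => [(PySem.Int.toChars (PySem.Int.mod (n - (k : Int)) 10)).headI]) := by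
    apply List.map_congr_left
    intro k _
    exact p16_toChars_digit _ (p16_mod_bounds _).1 (p16_mod_bounds _).2
  rw [h2, ← List.flatMap_def, p16_flatMap_singleton]

-- one row of A equals one row of B (0 ≤ i < n)
theorem p16_row (n i : Int) (h0 : 0 ≤ i) (h1 : i < n) :
    (PySem.List.pyRange 0 i 1).flatMap (fun j => PySem.Int.toChars (PySem.List.pyGetD
        (((PySem.List.pyRange 1 (n + 1) 1).map (fun k => PySem.Int.mod k 10)).reverse) j 0))
      ++ PySem.List.pyRepeat (PySem.Int.toChars (PySem.List.pyGetD
        (((PySem.List.pyRange 1 (n + 1) 1).map (fun k => PySem.Int.mod k 10)).reverse) i 0)) (n - i)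
    = ljustChars (PySem.List.slice
        (PySem.Chars.join [] ((PySem.List.pyRange n 0 (-1)).map (fun d => PySem.Int.toChars (PySem.Int.mod d 10))))
        none (some i)) n
        (PySem.List.pyGetD
          (PySem.Chars.join [] ((PySem.List.pyRange n 0 (-1)).map (fun d => PySem.Int.toChars (PySem.Int.mod d 10))))
          i ' ') := by
  rw [p16_diag n]
  set c : ℕ → Char := fun k => (PySem.Int.toChars (PySem.Int.mod (n - (k : Int)) 10)).headI with hc
  have hdig : ∀ (x : Int), PySem.Int.toChars (PySem.Int.mod x 10)
      = [(PySem.Int.toChars (PySem.Int.mod x 10)).headI] := fun x =>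
    p16_toChars_digit _ (p16_mod_bounds _).1 (p16_mod_bounds _).2
  -- B side: the slice is a take, the lookup is c i.toNat
  have hget : PySem.List.pyGetD ((List.range n.toNat).map c) i ' ' = c i.toNat := by
    have hi : i < (((List.range n.toNat).map c).length : Int) := by simp; omega
    rw [PySem.List.pyGetD_eq_getElem _ ' ' h0 hi, List.getElem_map, List.getElem_range]
  rw [hget, PySem.List.slice_to _ h0, ← List.map_take, List.take_range]
  have hmin : min i.toNat n.toNat = i.toNat := by omega
  rw [hmin]
  -- A side, first part: the prefix of digit characters
  have hfirst : (PySem.List.pyRange 0 i 1).flatMap (fun j => PySem.Int.toChars (PySem.List.pyGetD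
        (((PySem.List.pyRange 1 (n + 1) 1).map (fun k => PySem.Int.mod k 10)).reverse) j 0))
      = (List.range i.toNat).map c := by
    rw [PySem.List.pyRange_one 0 i, List.flatMap_map]
    simp only [Int.sub_zero, zero_add]
    have hcg : ∀ k ∈ List.range i.toNat,
        PySem.Int.toChars (PySem.List.pyGetD
          (((PySem.List.pyRange 1 (n + 1) 1).map (fun k => PySem.Int.mod k 10)).reverse) (k : Int) 0)
        = [c k] := by
      intro k hk
      have hk' : (k : Int) < i := by
        have := List.mem_range.mp hk
        omega
      rw [p16_nums_get n (k : Int) (by omega) (by omega), hc]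
      exact hdig _
    rw [List.flatMap_def, List.map_congr_left hcg, ← List.flatMap_def, p16_flatMap_singleton]
  rw [hfirst]
  -- A side, second part: the repeated fill character
  have hsecond : PySem.List.pyRepeat (PySem.Int.toChars (PySem.List.pyGetD
        (((PySem.List.pyRange 1 (n + 1) 1).map (fun k => PySem.Int.mod k 10)).reverse) i 0)) (n - i)
      = List.replicate (n - i).toNat (c i.toNat) := by
    rw [p16_nums_get n i h0 h1]
    have hni : n - i = n - ((i.toNat : Int)) := by omega
    rw [hni, hdig, hc]
    exact PySem.List.pyRepeat_singleton _ _
  rw [hsecond]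
  -- both sides are now prefix ++ replicate
  unfold ljustChars
  congr 1
  simp
  omega

-- dropping the trailing '\n' from newline-terminated rows is a '\n'-join
theorem p16_dropLast_join (f : Int → List Char) (c : Char) :
    ∀ (l : List Int), l ≠ [] →
      (l.flatMap (fun i => f i ++ [c])).dropLast = PySem.Chars.join [c] (l.map f) := by
  intro l
  induction l with
  | nil => intro h; exact absurd rfl h
  | cons a t ih =>
    intro _
    cases t with
    | nil =>
      simp [PySem.Chars.join_singleton]
    | cons b t' =>
      have hstep : (a :: b :: t').flatMap (fun i => f i ++ [c])
          = (f a ++ [c]) ++ (b :: t').flatMap (fun i => f i ++ [c]) := by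
        rw [List.flatMap_cons]
      rw [hstep, List.dropLast_append_of_ne_nil (by simp), ih (by simp)]
      simp [PySem.Chars.join_cons_cons, List.append_assoc]

theorem pattern16_main (n : Int) : pattern16 n = pattern16_alt n := by
  by_cases h : n ≤ 0
  · simp [pattern16, pattern16_alt, h]
  · push Not at h
    rw [pattern16, pattern16_alt, if_neg (by omega), if_neg (by omega)]
    simp only [PySem.List.slice?_none_none_neg_one, Option.getD_some]
    rw [p16_loopA, List.nil_append, PySem.List.slice_to_neg_one]
    have hne : PySem.List.pyRange 0 n 1 ≠ [] := by
      intro hnil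
      have := congrArg List.length hnil
      rw [PySem.List.length_pyRange_one] at this
      simp at this
      omega
    have hmap : (PySem.List.pyRange 0 n 1).flatMap (fun i =>
          ((PySem.List.pyRange 0 i 1).flatMap (fun j => PySem.Int.toChars (PySem.List.pyGetD
              (((PySem.List.pyRange 1 (n + 1) 1).map (fun k => PySem.Int.mod k 10)).reverse) j 0))
            ++ PySem.List.pyRepeat (PySem.Int.toChars (PySem.List.pyGetD
              (((PySem.List.pyRange 1 (n + 1) 1).map (fun k => PySem.Int.mod k 10)).reverse) i 0)) (n - i)) ++ ['\n'])
        = (PySem.List.pyRange 0 n 1).flatMap (fun i =>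
            ljustChars (PySem.List.slice
              (PySem.Chars.join [] ((PySem.List.pyRange n 0 (-1)).map (fun d => PySem.Int.toChars (PySem.Int.mod d 10))))
              none (some i)) n
              (PySem.List.pyGetD
                (PySem.Chars.join [] ((PySem.List.pyRange n 0 (-1)).map (fun d => PySem.Int.toChars (PySem.Int.mod d 10))))
                i ' ') ++ ['\n']) := by
      rw [List.flatMap_def, List.flatMap_def]
      congr 1
      apply List.map_congr_left
      intro i hi
      rcases PySem.List.mem_pyRange_one.mp hi with ⟨hi0, hin⟩
      rw [p16_row n i hi0 hin]
    rw [hmap]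
    rw [p16_dropLast_join _ '\n' _ hne]

-- ===== VERDICT (by name: the statement is the Claim_ definition above) =====
theorem pattern16_spec : Claim_equal_pattern16 := by
  intro n _
  unfold Spec_pattern16
  exact pattern16_main n
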